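-- pv_equiv track=rewrite | github.com/MeguruForever/My_homework | homework40-60/E055_2227406044.py | assignment55
-- ===== SOURCE A (Python) =====
-- def assignment55(binary):
--     num=0
--     sum_num=0
--     '''
--     :param binary: 二进制字符串
--     :return: num：0的个数，sum_num:所有数字之和
--
--     例子: binary:"10100101"
--     num:4 ,sum_num:4
--     '''
--     lst=list(binary)
--     for i in lst:
--         if i=='1':
--             num+=1
--         sum_num+=int(i)
--     return num,sum_num
-- ===== SOURCE B (Python) =====
-- import collections
-- def assignment55(binary):
--     counts = collections.Counter(binary)
--     num = counts['1']
--     sum_num = sum(int(d) * c for d, c in counts.items())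
--     return num, sum_num
-- ===== Notes on version B (the rewrite author's own statement) =====
-- stated objective: alternative
-- what changed: Replaces the per-character loop with a Counter histogram: num is read off counts['1'] and sum_num is a weighted sum over the distinct digits and their multiplicities.
import Mathlib
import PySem

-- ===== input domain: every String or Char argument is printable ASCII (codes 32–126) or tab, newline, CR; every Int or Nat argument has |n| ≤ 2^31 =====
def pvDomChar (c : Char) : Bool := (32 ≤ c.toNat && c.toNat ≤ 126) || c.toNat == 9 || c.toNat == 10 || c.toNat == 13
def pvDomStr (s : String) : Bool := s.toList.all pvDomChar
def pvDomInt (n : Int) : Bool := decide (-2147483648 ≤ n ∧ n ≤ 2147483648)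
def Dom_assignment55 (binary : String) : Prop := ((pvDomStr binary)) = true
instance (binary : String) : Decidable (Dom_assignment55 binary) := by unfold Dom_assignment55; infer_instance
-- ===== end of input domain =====

-- B replaces A's per-character loop by a Counter histogram: num = counts['1'] and
-- sum_num = a weighted sum over the DISTINCT digits and their multiplicities (objective: alternative).

-- ===== PORT A =====
-- for i in lst: if i=='1': num+=1; sum_num += int(i)   — int(i) = PySem.Int.ofChars? [i]
-- (none exactly where Python raises ValueError; those inputs are outside Pre_assignment55)
def assignment55 (binary : String) : Int × Int :=
  let lst := binary.toList
  lst.foldl (fun (s : Int × Int) i =>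
    (if i == '1' then s.1 + 1 else s.1, s.2 + (PySem.Int.ofChars? [i]).getD 0)) (0, 0)

-- ===== PORT B =====
-- counts = Counter(binary); num = counts['1']; sum_num = Σ int(d)*c over counts.items()
def assignment55_alt (binary : String) : Int × Int :=
  let counts : PySem.Dict Char Int := PySem.Dict.counter binary.toList
  let num := counts.getD '1' 0
  let sum_num := (counts.items.map (fun p => (PySem.Int.ofChars? [p.1]).getD 0 * p.2)).sum
  (num, sum_num)

-- ===== PRECONDITION & SPEC =====
-- Pre_ excludes strings containing a non-digit character: there Python's int(i)
-- raises ValueError in A (and in B's generator alike), so neither returns.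
def Pre_assignment55 (binary : String) : Prop :=
  binary.toList.all (fun c => c.isDigit) = true
instance (binary : String) : Decidable (Pre_assignment55 binary) := by
  unfold Pre_assignment55; infer_instance

def pvWitness_assignment55 : String := "10100101"

def Spec_assignment55 (binary : String) (out : Int × Int) : Prop := out = assignment55_alt binary
instance (binary : String) (out : Int × Int) : Decidable (Spec_assignment55 binary out) := by
  unfold Spec_assignment55; infer_instance

-- ===== CLAIM (what is proved, stated in full; the proofs are below) =====
def Claim_equal_assignment55 : Prop := ∀ (binary : String), Dom_assignment55 binary → Pre_assignment55 binary → Spec_assignment55 binary (assignment55 binary)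

-- ===== LEMMAS AND PROOFS =====

-- the distinct elements in first-insertion order are a permutation of Mathlib's dedup
theorem pv_ofList_perm_dedup (l : List Char) : (PySem.Set.ofList l).Perm l.dedup := by
  apply (List.perm_iff_count).2
  intro a
  rw [List.count_dedup]
  by_cases h : a ∈ l
  · simp [h]
  · simp [h, List.count_eq_zero_of_not_mem (fun hc => h ((PySem.Set.mem_ofList _ _).1 hc))]

-- summing f over the list = summing f k * multiplicity over its distinct elements
theorem pv_weighted_sum (l : List Char) (f : Char → Int) :
    ((PySem.Set.ofList l).map (fun k => f k * (l.count k : Int))).sum = (l.map f).sum := by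
  rw [List.Perm.sum_eq (List.Perm.map _ (pv_ofList_perm_dedup l))]
  have h := Finset.sum_multiset_map_count (l : Multiset Char) f
  simp only [Finset.sum, Multiset.toFinset, Multiset.coe_dedup, Multiset.map_coe,
    Multiset.sum_coe] at h
  rw [h]
  apply congrArg List.sum
  apply List.map_congr_left
  intro k _
  simp [mul_comm]

-- ===== VERDICT (by name: the statement is the Claim_ definition above) =====
theorem assignment55_spec : Claim_equal_assignment55 := by
  intro binary _ _
  unfold Spec_assignment55 assignment55 assignment55_alt
  rw [PySem.List.foldl_prod_mk
      (f := fun (a : Int) i => if i == '1' then a + 1 else a)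
      (g := fun (a : Int) i => a + (PySem.Int.ofChars? [i]).getD 0)]
  rw [PySem.List.foldl_beq_add_one, PySem.List.foldl_add]
  simp only [PySem.Dict.getD_counter, PySem.Dict.items_counter, List.map_map, Function.comp_def]
  rw [pv_weighted_sum binary.toList (fun c => (PySem.Int.ofChars? [c]).getD 0)]
  simp
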